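-- pv_equiv track=rewrite | github.com/Al-Log/Scaf-1007 | day19/solutions19.py | solution
-- ===== SOURCE A (Python) =====
-- def solution(progresses, speeds):
--     answer=[]
--     a=list(progresses)
--     b=list(speeds)
--     c=[]
--     d=0
--     for k in range(len(a)):
--         while a[k]<100:
--             a[k]+=b[k]
--             d+=1
--         c.append(d)
--         d=0
--     e=c[0]
--     f=1
--     for i in c[1:]:
--         if i <= e:
--             f+=1
--         else:
--             answer.append(f)
--             f=1
--             e = i
--     answer.append(f)
--     return answer
-- ===== SOURCE B (Python) =====
-- def solution(progresses, speeds):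
--     days = [0 if p >= 100 else -((p - 100) // speeds[i])
--             for i, p in enumerate(progresses)]
--     starts = []
--     m = None
--     for i, d in enumerate(days):
--         if m is None or d > m:
--             starts.append(i)
--             m = d
--     return [q - p for p, q in zip(starts, starts[1:] + [len(days)])]
-- ===== Notes on version B (the rewrite author's own statement) =====
-- stated objective: faster
-- what changed: days per task computed by ceiling division instead of a progress-incrementing while loop, and batches formed by recording prefix-max indices and taking consecutive differences instead of a stateful counter scan; intended as faster (O(n) vs O(n*maxDays)) — a timing run could not measure a ratio because A timed out at n=16 where B returned
import Mathlib
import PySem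

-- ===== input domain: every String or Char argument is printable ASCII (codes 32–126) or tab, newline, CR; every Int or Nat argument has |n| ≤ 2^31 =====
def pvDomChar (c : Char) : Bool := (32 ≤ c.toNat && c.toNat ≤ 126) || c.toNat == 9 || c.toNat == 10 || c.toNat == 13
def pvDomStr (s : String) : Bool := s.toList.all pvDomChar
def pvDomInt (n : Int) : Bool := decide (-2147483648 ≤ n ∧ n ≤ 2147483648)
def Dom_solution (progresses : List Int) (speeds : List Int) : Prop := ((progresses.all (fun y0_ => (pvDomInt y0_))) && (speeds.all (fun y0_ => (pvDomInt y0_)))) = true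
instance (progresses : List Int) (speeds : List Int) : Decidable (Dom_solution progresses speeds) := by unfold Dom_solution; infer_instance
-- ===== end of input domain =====

-- B computes each task's days by ceiling division and batches by prefix-max record
-- indices with consecutive differences, replacing A's per-day incrementing loop
-- (objective: intended as faster; a timing run could not measure a ratio — A timed
-- out at n=16 where B returned). Return-value equivalence; A does not mutate arguments.

-- ===== PORT A =====
-- the 'while a[k] < 100' loop of A, threading the day counter d.
-- Python DIVERGES when a < 100 and s ≤ 0; that branch returns d here and is excluded by Pre_.
def pvWhileA (a s d : Int) : Int :=
  if _h : a < 100 then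
    if _hs : 0 < s then pvWhileA (a + s) s (d + 1) else d
  else d
termination_by (100 - a).toNat
decreasing_by omega

def solution (progresses : List Int) (speeds : List Int) : List Int :=
  let a := progresses
  let b := speeds
  -- first loop: build c (days per task); a[k]/b[k] via pyGetD; out-of-range b[k]
  -- (IndexError in Python) is excluded by Pre_.
  let cd := (PySem.List.pyRange 0 (a.length : Int) 1).foldl
    (fun (st : List Int × Int) k =>
      let d' := pvWhileA (PySem.List.pyGetD a k 0) (PySem.List.pyGetD b k 0) st.2
      (st.1 ++ [d'], 0))
    ([], 0)
  let c := cd.1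
  -- e = c[0] raises IndexError on empty input; excluded by Pre_.
  let e0 := PySem.List.pyGetD c 0 0
  let fin := (PySem.List.slice c (some 1) none).foldl
    (fun (st : List Int × Int × Int) i =>
      if i ≤ st.2.2 then (st.1, st.2.1 + 1, st.2.2)
      else (st.1 ++ [st.2.1], 1, i))
    ([], 1, e0)
  fin.1 ++ [fin.2.1]

-- ===== PORT B =====
def solution_alt (progresses : List Int) (speeds : List Int) : List Int :=
  -- days comprehension: speeds[i] via pyGetD (IndexError excluded by Pre_;
  -- only evaluated in the p < 100 branch, as in Python's conditional expression)
  let days := (PySem.List.enumerate progresses 0).map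
    (fun ip => if 100 ≤ ip.2 then 0
               else -(PySem.Int.floordiv (ip.2 - 100) (PySem.List.pyGetD speeds ip.1 0)))
  -- record prefix-max indices
  let sm := (PySem.List.enumerate days 0).foldl
    (fun (st : List Int × Option Int) id_ =>
      match st.2 with
      | none => (st.1 ++ [id_.1], some id_.2)
      | some m => if m < id_.2 then (st.1 ++ [id_.1], some id_.2) else st)
    ([], none)
  let starts := sm.1
  List.zipWith (fun p q => q - p) starts
    (PySem.List.slice starts (some 1) none ++ [(days.length : Int)])

-- ===== PRECONDITION & SPEC =====
-- Pre_ excludes exactly: empty progresses (A raises IndexError at c[0]); tasks with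
-- progress < 100 whose speed index is out of range (A raises IndexError) or whose
-- speed is ≤ 0 (A's while loop diverges, or never terminates for negative speed).
def Pre_solution (progresses : List Int) (speeds : List Int) : Prop :=
  progresses ≠ [] ∧
  ∀ k : Nat, k < progresses.length →
    (100 ≤ progresses.getD k 0 ∨ (k < speeds.length ∧ 0 < speeds.getD k 0))
instance (progresses : List Int) (speeds : List Int) : Decidable (Pre_solution progresses speeds) := by unfold Pre_solution; infer_instance
def pvWitness_solution : List Int × List Int := ([0, 30, 95], [50, 1, 99])

def Spec_solution (progresses : List Int) (speeds : List Int) (out : List Int) : Prop := out = solution_alt progresses speeds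
instance (progresses : List Int) (speeds : List Int) (out : List Int) : Decidable (Spec_solution progresses speeds out) := by unfold Spec_solution; infer_instance

-- ===== CLAIM (what is proved, stated in full; the proofs are below) =====
def Claim_equal_solution : Prop := ∀ (progresses : List Int) (speeds : List Int), Dom_solution progresses speeds → Pre_solution progresses speeds → Spec_solution progresses speeds (solution progresses speeds)
-- ===== LEMMAS AND PROOFS =====

-- common specification of the batch-grouping pass
def pvGroups (e f : Int) : List Int → List Int
  | [] => [f]
  | i :: rest => if i ≤ e then pvGroups e (f + 1) rest else f :: pvGroups i 1 rest

-- the record-index list B's fold computes, starting from known max m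
def pvRec (m : Int) : List (Int × Int) → List Int
  | [] => []
  | (i, d) :: rest => if m < d then i :: pvRec d rest else pvRec m rest

-- pvWhileA closed form for positive speed
lemma pvWhileA_eq (a s d : Int) (hs : 0 < s) :
    pvWhileA a s d = d + (if 100 ≤ a then 0 else -(PySem.Int.floordiv (a - 100) s)) := by
  fun_induction pvWhileA a s d with
  | case1 a d h hsp ih =>
    rw [ih]
    have h1 : ¬ (100 ≤ a) := by omega
    by_cases h2 : 100 ≤ a + s
    · have : -(PySem.Int.floordiv (a - 100) s) = 1 := by
        have := (PySem.Int.neg_floordiv_neg_eq_iff_of_pos (a := 100 - a) (b := s) (q := 1) hs)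
        rw [show -(100 - a) = a - 100 by ring] at this
        exact this.mpr (by constructor <;> nlinarith)
      simp [h1, h2, this]
    · have key := (PySem.Int.neg_floordiv_neg_eq_iff_of_pos (a := 100 - (a + s)) (b := s)
        (q := -(PySem.Int.floordiv (a + s - 100) s)) hs)
      rw [show -(100 - (a + s)) = a + s - 100 by ring] at key
      obtain ⟨k1, k2⟩ := key.mp rfl
      have : -(PySem.Int.floordiv (a - 100) s) = 1 + -(PySem.Int.floordiv (a + s - 100) s) := by
        have := (PySem.Int.neg_floordiv_neg_eq_iff_of_pos (a := 100 - a) (b := s)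
          (q := 1 + -(PySem.Int.floordiv (a + s - 100) s)) hs)
        rw [show -(100 - a) = a - 100 by ring] at this
        exact this.mpr (by constructor <;> nlinarith)
      simp [h1, h2, this]
      ring
  | case2 a d h hsp => omega
  | case3 a d h =>
    have : 100 ≤ a := by omega
    simp [this]

-- generic: fold that appends h(k, st.2) and resets st.2 to 0
lemma foldA_spec (h : Int → Int → Int) (l : List Int) (acc : List Int) :
    l.foldl (fun (st : List Int × Int) k => (st.1 ++ [h k st.2], 0)) (acc, 0)
      = (acc ++ l.map (fun k => h k 0), 0) := by
  induction l generalizing acc with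
  | nil => simp
  | cons x xs ih => simp [List.foldl_cons, ih]

-- elements of enumerate
lemma getElem_enumerate {α : Type} (xs : List α) (s : Int) (k : Nat)
    (h : k < xs.length) :
    (PySem.List.enumerate xs s)[k]'(by simp [PySem.List.length_enumerate]; exact h)
      = (s + k, xs[k]) := by
  induction xs generalizing s k with
  | nil => simp at h
  | cons x xs ih =>
    cases k with
    | zero => simp [PySem.List.enumerate_cons]
    | succ n =>
      have hn : n < xs.length := by simpa using h
      simp only [PySem.List.enumerate_cons, List.getElem_cons_succ]
      rw [ih (s+1) n hn]
      simp only [Prod.mk.injEq]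
      exact ⟨by push_cast; ring, trivial⟩

-- B's fold accumulates the record indices
lemma foldB_spec (ps : List (Int × Int)) (acc : List Int) (m : Int) :
    ((ps.foldl
      (fun (st : List Int × Option Int) id_ =>
        match st.2 with
        | none => (st.1 ++ [id_.1], some id_.2)
        | some m => if m < id_.2 then (st.1 ++ [id_.1], some id_.2) else st)
      (acc, some m))).1 = acc ++ pvRec m ps := by
  induction ps generalizing acc m with
  | nil => simp [pvRec]
  | cons p rest ih =>
    obtain ⟨i, d⟩ := p
    by_cases h : m < d
    · simp only [List.foldl_cons, pvRec, if_pos h, ih]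
      simp
    · simp only [List.foldl_cons, pvRec, if_neg h, ih]

-- A's grouping fold equals pvGroups
lemma foldGroup_spec (l : List Int) (ans : List Int) (f e : Int) :
    (l.foldl
        (fun (st : List Int × Int × Int) i =>
          if i ≤ st.2.2 then (st.1, st.2.1 + 1, st.2.2)
          else (st.1 ++ [st.2.1], 1, i)) (ans, f, e)).1
      ++ [(l.foldl
        (fun (st : List Int × Int × Int) i =>
          if i ≤ st.2.2 then (st.1, st.2.1 + 1, st.2.2)
          else (st.1 ++ [st.2.1], 1, i)) (ans, f, e)).2.1] = ans ++ pvGroups e f l := by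
  induction l generalizing ans f e with
  | nil => simp [pvGroups]
  | cons i rest ih =>
    by_cases h : i ≤ e
    · simpa [pvGroups, h] using ih ans (f + 1) e
    · simpa [pvGroups, h] using ih (ans ++ [f]) 1 i

-- diffs of record starts equal pvGroups
lemma diffs_rec (l : List Int) (j p0 m : Int) :
    List.zipWith (fun p q => q - p)
      (p0 :: pvRec m (PySem.List.enumerate l j))
      (pvRec m (PySem.List.enumerate l j) ++ [j + (l.length : Int)])
      = pvGroups m (j - p0) l := by
  induction l generalizing j p0 m with
  | nil => simp [pvRec, pvGroups, PySem.List.enumerate_nil]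
  | cons d rest ih =>
    rw [PySem.List.enumerate_cons]
    by_cases h : m < d
    · simp only [pvRec, if_pos h, List.zipWith_cons_cons, List.cons_append]
      have := ih (j + 1) j d
      rw [show j + 1 + (rest.length : Int) = j + ((d :: rest).length : Int) by push_cast [List.length_cons]; ring] at this
      rw [this]
      have h2 : ¬ (d ≤ m) := by omega
      simp [pvGroups, h2]
    · simp only [pvRec, if_neg h]
      have := ih (j + 1) p0 m
      rw [show j + 1 + (rest.length : Int) = j + ((d :: rest).length : Int) by push_cast [List.length_cons]; ring] at this
      rw [this]
      have h2 : d ≤ m := by omega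
      rw [show j + 1 - p0 = (j - p0) + 1 by ring]
      simp [pvGroups, h2]

-- the two day lists coincide under Pre_
lemma days_eq (progresses speeds : List Int)
    (hk : ∀ k : Nat, k < progresses.length →
      (100 ≤ progresses.getD k 0 ∨ (k < speeds.length ∧ 0 < speeds.getD k 0))) :
    (PySem.List.pyRange 0 (progresses.length : Int) 1).map
        (fun k => pvWhileA (PySem.List.pyGetD progresses k 0) (PySem.List.pyGetD speeds k 0) 0)
      = (PySem.List.enumerate progresses 0).map
        (fun ip => if 100 ≤ ip.2 then 0
                   else -(PySem.Int.floordiv (ip.2 - 100) (PySem.List.pyGetD speeds ip.1 0))) := by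
  apply List.ext_getElem
  · simp [PySem.List.length_pyRange_one, PySem.List.length_enumerate]
  · intro k h1 h2
    simp only [List.getElem_map]
    have hk1 : k < progresses.length := by
      simpa [PySem.List.length_pyRange_one] using h1
    rw [PySem.List.getElem_pyRange_one]
    rw [getElem_enumerate progresses 0 k hk1]
    have hget : PySem.List.pyGetD progresses ((0:Int) + (k:Int)) 0 = progresses[k] := by
      rw [show (0:Int) + (k:Int) = (k:Int) by ring]
      simp [PySem.List.pyGetD_natCast, List.getD_eq_getElem?_getD, hk1]
    rcases hk k hk1 with hbig | ⟨hlt, hpos⟩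
    · have hb : (100:Int) ≤ progresses[k] := by
        rwa [List.getD_eq_getElem?_getD, List.getElem?_eq_getElem hk1] at hbig
      rw [hget]
      rw [pvWhileA]
      simp [show ¬ (progresses[k] < 100) by omega, hb]
    · have hs : (0:Int) < PySem.List.pyGetD speeds ((0:Int) + (k:Int)) 0 := by
        rw [show (0:Int) + (k:Int) = (k:Int) by ring]
        rw [PySem.List.pyGetD_natCast]
        rwa [List.getD_eq_getElem?_getD, List.getElem?_eq_getElem hlt] at hpos ⊢
      rw [hget, pvWhileA_eq _ _ _ hs]
      simp

-- ===== VERDICT (by name: the statement is the Claim_ definition above) =====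
theorem solution_spec : Claim_equal_solution := by
  intro progresses speeds _hdom hpre
  obtain ⟨hne, hk⟩ := hpre
  unfold Spec_solution solution solution_alt
  dsimp only
  rw [foldA_spec (fun k d => pvWhileA (PySem.List.pyGetD progresses k 0) (PySem.List.pyGetD speeds k 0) d)]
  rw [days_eq progresses speeds hk]
  set days := (PySem.List.enumerate progresses 0).map
      (fun ip => if 100 ≤ ip.2 then 0
                 else -(PySem.Int.floordiv (ip.2 - 100) (PySem.List.pyGetD speeds ip.1 0))) with hdays
  have hlen : days.length = progresses.length := by
    simp [hdays, PySem.List.length_enumerate]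
  obtain ⟨d0, tl, hdl⟩ : ∃ d0 tl, days = d0 :: tl := by
    cases hdd : days with
    | nil => rw [hdd] at hlen; cases progresses <;> simp_all
    | cons x xs => exact ⟨x, xs, rfl⟩
  rw [hdl]
  simp only [List.nil_append]
  rw [PySem.List.slice_from_one, PySem.List.slice_from_one]
  simp only [List.tail_cons]
  rw [foldGroup_spec tl [] 1 (PySem.List.pyGetD (d0 :: tl) 0 0)]
  rw [PySem.List.pyGetD_zero_cons]
  rw [PySem.List.enumerate_cons, List.foldl_cons]
  dsimp only
  rw [foldB_spec (PySem.List.enumerate tl (0 + 1)) ([] ++ [0]) d0]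
  simp only [List.nil_append, List.singleton_append, List.tail_cons]
  have hd := diffs_rec tl 1 0 d0
  rw [show ((0:Int) + 1) = 1 by ring]
  rw [show (((d0 :: tl).length : Nat) : Int) = 1 + (tl.length : Int) by
    push_cast [List.length_cons]; ring]
  rw [hd]
  norm_num
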